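-- pv_equiv track=rewrite | github.com/zengtianli/vps | learning_digest.py | build_weekly_prompt
-- ===== SOURCE A (Python) =====
-- def build_weekly_prompt(start_date, end_date, sessions, learn_changes):
--     """构建周汇总的 API prompt"""
--     # 按天分组
--     daily_groups = {}
--     for s in sessions:
--         day = s.get("start_time", "")[:10]
--         if day not in daily_groups:
--             daily_groups[day] = []
--         daily_groups[day].append(s.get("title", "")[:80])
--
--     daily_summary = ""
--     for day in sorted(daily_groups.keys()):
--         titles = daily_groups[day]
--         daily_summary += f"\n### {day}（{len(titles)} 个会话）\n"
--         for t in titles: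
--             daily_summary += f"- {t}\n"
--
--     learn_text = ""
--     if learn_changes:
--         learn_text = "\nLearn 变更:\n"
--         for c in learn_changes[:5]:
--             learn_text += f"- {c['file']}: {c['preview'][:150]}\n"
--         learn_text = learn_text[:800]
--
--     return f"""根据以下一周 CC 会话记录，生成中文周学习汇总。
--
-- {start_date} ~ {end_date}，共 {len(sessions)} 个会话
--
-- {daily_summary[:3500]}
--
-- {learn_text}
--
-- 生成 Markdown，包含：本周概览、按主题分类（表格：概念/掌握程度⭐/来源）、每日记录、踩坑记录、核心认知升级、下周方向。
--
-- （列出所有有实质学习的主题）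
--
-- ## 本周每日记录
-- ### 周一 M/DD — 一句话主题
-- - 要点 1
-- - 要点 2
--
-- ## 本周踩坑记录
-- | 坑 | 原因 | 教训 |
-- |----|------|------|
--
-- ## 核心认知升级
-- 1. xxx
--
-- ## 下周可以深入的方向
-- - xxx
--
-- 注意：
-- - 跳过无实质内容的会话
-- - 关注学到了什么，而不是做了什么
-- - 技术术语保留英文原文
-- - 掌握程度标准：⭐ 刚接触 / ⭐⭐ 理解原理 / ⭐⭐⭐ 能独立操作
-- """
-- ===== SOURCE B (Python) =====
-- def build_weekly_prompt(start_date, end_date, sessions, learn_changes):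
--     """构建周汇总的 API prompt"""
--     # 按天分组: one pass to (day, title) pairs, then sorted distinct days + per-day filter
--     pairs = [(s.get("start_time", "")[:10], s.get("title", "")[:80]) for s in sessions]
--     days = sorted({d for d, _ in pairs})
--     daily_summary = "".join(
--         f"\n### {d}（{len(ts)} 个会话）\n" + "".join(f"- {t}\n" for t in ts)
--         for d in days
--         for ts in [[t for dd, t in pairs if dd == d]]
--     )
--
--     lines = [f"- {c['file']}: {c['preview'][:150]}\n" for c in learn_changes[:5]]
--     learn_text = ("\nLearn 变更:\n" + "".join(lines))[:800] if learn_changes else ""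
--
--     return f"""根据以下一周 CC 会话记录，生成中文周学习汇总。
--
-- {start_date} ~ {end_date}，共 {len(sessions)} 个会话
--
-- {daily_summary[:3500]}
--
-- {learn_text}
--
-- 生成 Markdown，包含：本周概览、按主题分类（表格：概念/掌握程度⭐/来源）、每日记录、踩坑记录、核心认知升级、下周方向。
--
-- （列出所有有实质学习的主题）
--
-- ## 本周每日记录
-- ### 周一 M/DD — 一句话主题
-- - 要点 1
-- - 要点 2
--
-- ## 本周踩坑记录
-- | 坑 | 原因 | 教训 |
-- |----|------|------|
--
-- ## 核心认知升级
-- 1. xxx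
--
-- ## 下周可以深入的方向
-- - xxx
--
-- 注意：
-- - 跳过无实质内容的会话
-- - 关注学到了什么，而不是做了什么
-- - 技术术语保留英文原文
-- - 掌握程度标准：⭐ 刚接触 / ⭐⭐ 理解原理 / ⭐⭐⭐ 能独立操作
-- """
-- ===== Notes on version B (the rewrite author's own statement) =====
-- stated objective: alternative
-- what changed: Replaces A's incrementally-built dict of day->titles (conditional empty insert + append, then sorted(keys) lookup loop) by a flat one-pass (day,title) pair list whose distinct days are sorted as a set and whose per-day titles are recovered by filtering, with the summary and learn text assembled by join over comprehensions instead of string-accumulator loops.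
import Mathlib
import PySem

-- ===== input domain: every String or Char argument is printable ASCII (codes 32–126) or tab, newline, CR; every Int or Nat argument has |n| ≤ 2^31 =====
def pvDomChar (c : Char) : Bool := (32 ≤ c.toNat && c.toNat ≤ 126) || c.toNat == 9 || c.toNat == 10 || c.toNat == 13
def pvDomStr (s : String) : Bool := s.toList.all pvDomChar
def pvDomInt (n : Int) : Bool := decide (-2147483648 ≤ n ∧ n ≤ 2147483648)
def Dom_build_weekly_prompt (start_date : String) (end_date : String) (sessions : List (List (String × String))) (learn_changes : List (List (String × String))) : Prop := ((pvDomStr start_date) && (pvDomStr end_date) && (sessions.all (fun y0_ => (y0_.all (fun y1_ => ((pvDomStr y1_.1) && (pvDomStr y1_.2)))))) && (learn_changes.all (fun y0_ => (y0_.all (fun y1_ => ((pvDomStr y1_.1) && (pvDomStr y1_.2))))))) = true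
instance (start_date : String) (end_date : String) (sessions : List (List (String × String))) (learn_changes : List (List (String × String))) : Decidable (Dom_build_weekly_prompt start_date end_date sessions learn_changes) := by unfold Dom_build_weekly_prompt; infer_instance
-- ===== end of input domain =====

-- B replaces A's dict-of-lists grouping by a flat (day, title) pair list, sorted distinct days and a
-- per-day filter (objective: alternative decomposition, no dict; same asymptotic cost in practice).

-- ===== PORT A =====
-- Shared accessors: both Python sources contain these subexpressions verbatim
-- (s.get("start_time", "")[:10], s.get("title", "")[:80], the per-day header f-string,
-- the "- {t}\n" line, the learn-change line, and the final template f-string).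
def pvDayOf (s : List (String × String)) : List Char :=
  PySem.List.slice ((PySem.Dict.mk s).getD "start_time" "").toList none (some 10)
def pvTitleOf (s : List (String × String)) : List Char :=
  PySem.List.slice ((PySem.Dict.mk s).getD "title" "").toList none (some 80)
def pvDayHeader (day : List Char) (n : Int) : List Char :=
  "\n### ".toList ++ day ++ "（".toList ++ PySem.Int.toChars n ++ " 个会话）\n".toList
def pvTitleLine (t : List Char) : List Char :=
  "- ".toList ++ t ++ "\n".toList
def pvLearnLine (c : List (String × String)) : List Char :=
  "- ".toList ++ ((PySem.Dict.mk c).getD "file" "").toList ++ ": ".toList ++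
    PySem.List.slice ((PySem.Dict.mk c).getD "preview" "").toList none (some 150) ++ "\n".toList
def pvC1 : List Char := "根据以下一周 CC 会话记录，生成中文周学习汇总。\n\n".toList
def pvC2 : List Char := "，共 ".toList
def pvC3 : List Char := " 个会话\n\n".toList
def pvCTail : List Char := "生成 Markdown，包含：本周概览、按主题分类（表格：概念/掌握程度⭐/来源）、每日记录、踩坑记录、核心认知升级、下周方向。\n\n（列出所有有实质学习的主题）\n\n## 本周每日记录\n### 周一 M/DD — 一句话主题\n- 要点 1\n- 要点 2\n\n## 本周踩坑记录\n| 坑 | 原因 | 教训 |\n|----|------|------|\n\n## 核心认知升级\n1. xxx\n\n## 下周可以深入的方向\n- xxx\n\n注意：\n- 跳过无实质内容的会话\n- 关注学到了什么，而不是做了什么\n- 技术术语保留英文原文\n- 掌握程度标准：⭐ 刚接触 / ⭐⭐ 理解原理 / ⭐⭐⭐ 能独立操作\n".toList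
def pvTemplate (start_date : String) (end_date : String) (nSessions : Int) (daily_summary : List Char) (learn_text : List Char) : String :=
  String.ofList (pvC1 ++ start_date.toList ++ " ~ ".toList ++ end_date.toList ++ pvC2 ++
    PySem.Int.toChars nSessions ++ pvC3 ++ PySem.List.slice daily_summary none (some 3500) ++
    "\n\n".toList ++ learn_text ++ "\n\n".toList ++ pvCTail)

-- daily_groups: dict day -> list of titles, built exactly as A's loop does
def pvA_groups (sessions : List (List (String × String))) : PySem.Dict (List Char) (List (List Char)) :=
  sessions.foldl (fun d s =>
    let day := pvDayOf s
    let d1 := if d.contains day then d else d.insert day []   -- if day not in daily_groups: daily_groups[day] = []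
    d1.modify day [] (fun ts => ts ++ [pvTitleOf s]))          -- daily_groups[day].append(...)
    PySem.Dict.empty

def pvA_daily (sessions : List (List (String × String))) : List Char :=
  (PySem.List.sorted (pvA_groups sessions).keys (fun k => k) false).foldl
    (fun acc day =>
      let titles := (pvA_groups sessions).getD day []
      let acc1 := acc ++ pvDayHeader day (PySem.List.len titles)
      titles.foldl (fun a t => a ++ pvTitleLine t) acc1) []

def pvA_learn (learn_changes : List (List (String × String))) : List Char :=
  if learn_changes.isEmpty then [] else
    PySem.List.slice
      ((PySem.List.slice learn_changes none (some 5)).foldl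
        (fun lt c => lt ++ pvLearnLine c) "\nLearn 变更:\n".toList)
      none (some 800)

def build_weekly_prompt (start_date : String) (end_date : String) (sessions : List (List (String × String))) (learn_changes : List (List (String × String))) : String :=
  pvTemplate start_date end_date (PySem.List.len sessions) (pvA_daily sessions) (pvA_learn learn_changes)

-- ===== PORT B =====
def pvB_pairs (sessions : List (List (String × String))) : List (List Char × List Char) :=
  sessions.map (fun s => (pvDayOf s, pvTitleOf s))

def pvB_daily (sessions : List (List (String × String))) : List Char :=
  PySem.Chars.join []
    ((PySem.List.sorted (PySem.Set.ofList ((pvB_pairs sessions).map Prod.fst)) (fun d => d) false).map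
      (fun d =>
        let ts := ((pvB_pairs sessions).filter (fun p => p.1 == d)).map Prod.snd
        pvDayHeader d (PySem.List.len ts) ++ PySem.Chars.join [] (ts.map pvTitleLine)))

def pvB_learn (learn_changes : List (List (String × String))) : List Char :=
  let lines := (PySem.List.slice learn_changes none (some 5)).map pvLearnLine
  if learn_changes.isEmpty then []
  else PySem.List.slice ("\nLearn 变更:\n".toList ++ PySem.Chars.join [] lines) none (some 800)

def build_weekly_prompt_alt (start_date : String) (end_date : String) (sessions : List (List (String × String))) (learn_changes : List (List (String × String))) : String :=
  pvTemplate start_date end_date (PySem.List.len sessions) (pvB_daily sessions) (pvB_learn learn_changes)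

-- ===== PRECONDITION & SPEC =====
-- Pre_ excludes exactly the inputs on which Python A raises KeyError: a learn-change among the
-- first five missing the "file" or "preview" key (B raises there too).
def Pre_build_weekly_prompt (start_date : String) (end_date : String) (sessions : List (List (String × String))) (learn_changes : List (List (String × String))) : Prop :=
  ∀ c ∈ learn_changes.take 5, "file" ∈ c.map Prod.fst ∧ "preview" ∈ c.map Prod.fst
instance (start_date : String) (end_date : String) (sessions : List (List (String × String))) (learn_changes : List (List (String × String))) : Decidable (Pre_build_weekly_prompt start_date end_date sessions learn_changes) := by unfold Pre_build_weekly_prompt; infer_instance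
def pvWitness_build_weekly_prompt : String × String × (List (List (String × String))) × (List (List (String × String))) :=
  ("2024-01-01", "2024-01-07",
   [[("start_time", "2024-01-02T09:00:00"), ("title", "lean proofs")],
    [("start_time", "2024-01-02T11:00:00"), ("title", "dicts")]],
   [[("file", "learn/a.md"), ("preview", "notes")]])
def Spec_build_weekly_prompt (start_date : String) (end_date : String) (sessions : List (List (String × String))) (learn_changes : List (List (String × String))) (out : String) : Prop := out = build_weekly_prompt_alt start_date end_date sessions learn_changes
instance (start_date : String) (end_date : String) (sessions : List (List (String × String))) (learn_changes : List (List (String × String))) (out : String) : Decidable (Spec_build_weekly_prompt start_date end_date sessions learn_changes out) := by unfold Spec_build_weekly_prompt; infer_instance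

-- ===== CLAIM (what is proved, stated in full; the proofs are below) =====
def Claim_equal_build_weekly_prompt : Prop := ∀ (start_date : String) (end_date : String) (sessions : List (List (String × String))) (learn_changes : List (List (String × String))), Dom_build_weekly_prompt start_date end_date sessions learn_changes → Pre_build_weekly_prompt start_date end_date sessions learn_changes → Spec_build_weekly_prompt start_date end_date sessions learn_changes (build_weekly_prompt start_date end_date sessions learn_changes)

-- ===== LEMMAS AND PROOFS =====
theorem pvJoin_nil_flatten (ls : List (List Char)) : PySem.Chars.join [] ls = ls.flatten := by
  induction ls with
  | nil => rfl
  | cons a t ih => cases t with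
    | nil => simp [PySem.Chars.join, List.intercalate]
    | cons b u => rw [PySem.Chars.join_cons_cons]; simp_all

-- A's two-step dict update (conditional empty insert, then append) is one modify
theorem pvA_groups_eq (sessions : List (List (String × String))) :
    pvA_groups sessions =
      sessions.foldl (fun d s => d.modify (pvDayOf s) [] (fun ts => ts ++ [pvTitleOf s])) PySem.Dict.empty := by
  unfold pvA_groups
  congr 1
  funext d s
  by_cases h : d.contains (pvDayOf s)
  · simp [h]
  · have hc : d.contains (pvDayOf s) = false := by simpa using h
    simp [h, PySem.Dict.modify, PySem.Dict.insert_insert_self,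
      PySem.Dict.getD_of_not_contains d [] hc]

theorem pvA_groups_keys (sessions : List (List (String × String))) :
    (pvA_groups sessions).keys = PySem.Set.ofList (sessions.map pvDayOf) := by
  rw [pvA_groups_eq]
  rw [PySem.Dict.keys_foldl_modify_key sessions pvDayOf [] (fun _ s => fun ts => ts ++ [pvTitleOf s]) PySem.Dict.empty]
  simp [PySem.Dict.empty, PySem.Dict.keys, PySem.Set.update_nil_left]

theorem pvA_groups_getD (sessions : List (List (String × String))) (k : List Char) :
    (pvA_groups sessions).getD k [] =
      (sessions.filter (fun s => pvDayOf s == k)).map pvTitleOf := by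
  rw [pvA_groups_eq]
  suffices h : ∀ (l : List (List (String × String))) (d : PySem.Dict (List Char) (List (List Char))),
      (l.foldl (fun d s => d.modify (pvDayOf s) [] (fun ts => ts ++ [pvTitleOf s])) d).getD k [] =
        d.getD k [] ++ (l.filter (fun s => pvDayOf s == k)).map pvTitleOf by
    rw [h]; simp [PySem.Dict.empty, PySem.Dict.getD, PySem.Dict.get?]
  intro l
  induction l with
  | nil => simp
  | cons s l ih =>
    intro d
    simp only [List.foldl_cons, List.filter_cons]
    rw [ih]
    by_cases h : pvDayOf s = k
    · simp [PySem.Dict.modify, h]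
    · simp [PySem.Dict.modify, PySem.Dict.getD_insert, h, Ne.symm h]

theorem pv_daily_eq (sessions : List (List (String × String))) :
    pvA_daily sessions = pvB_daily sessions := by
  unfold pvA_daily pvB_daily
  rw [pvA_groups_keys]
  have hdays : (pvB_pairs sessions).map Prod.fst = sessions.map pvDayOf := by
    simp [pvB_pairs]
  rw [hdays]
  have hts : ∀ d : List Char,
      ((pvB_pairs sessions).filter (fun p => p.1 == d)).map Prod.snd =
        (sessions.filter (fun s => pvDayOf s == d)).map pvTitleOf := by
    intro d
    simp [pvB_pairs, List.filter_map, Function.comp_def]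
  have hblock : ∀ acc day,
      (((pvA_groups sessions).getD day []).foldl (fun a t => a ++ pvTitleLine t)
          (acc ++ pvDayHeader day (PySem.List.len ((pvA_groups sessions).getD day [])))) =
        acc ++ (pvDayHeader day (PySem.List.len ((sessions.filter (fun s => pvDayOf s == day)).map pvTitleOf)) ++
          ((sessions.filter (fun s => pvDayOf s == day)).map pvTitleOf).flatMap pvTitleLine) := by
    intro acc day
    rw [pvA_groups_getD, PySem.List.foldl_append_eq_flatMap, List.append_assoc]
  have hfunA : (fun (acc day : List Char) =>
      let titles := (pvA_groups sessions).getD day []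
      let acc1 := acc ++ pvDayHeader day (PySem.List.len titles)
      titles.foldl (fun a t => a ++ pvTitleLine t) acc1) =
      (fun acc day => acc ++
        (pvDayHeader day (PySem.List.len ((sessions.filter (fun s => pvDayOf s == day)).map pvTitleOf)) ++
          ((sessions.filter (fun s => pvDayOf s == day)).map pvTitleOf).flatMap pvTitleLine)) := by
    funext acc day
    exact hblock acc day
  rw [hfunA, PySem.List.foldl_append_eq_flatMap, List.nil_append]
  simp only [hts, pvJoin_nil_flatten, List.flatMap_def]

theorem pv_learn_eq (learn_changes : List (List (String × String))) :
    pvA_learn learn_changes = pvB_learn learn_changes := by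
  unfold pvA_learn pvB_learn
  by_cases h : learn_changes.isEmpty
  · simp [h]
  · simp only [h, Bool.false_eq_true, if_false]
    rw [PySem.List.foldl_append_eq_flatMap, pvJoin_nil_flatten, List.flatMap_def]

-- ===== VERDICT (by name: the statement is the Claim_ definition above) =====
theorem build_weekly_prompt_spec : Claim_equal_build_weekly_prompt := by
  intro start_date end_date sessions learn_changes _ _
  unfold Spec_build_weekly_prompt build_weekly_prompt build_weekly_prompt_alt
  rw [pv_daily_eq, pv_learn_eq]
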